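-- pv_equiv track=rewrite | github.com/alexey-izhendeev/chinese_time_flask | calculations.py | solar_to_chinese
-- ===== SOURCE A (Python) =====
-- def find_hours(ephem_time):  # returns only hours (as a string) from ephem astronomic time
--     str_hour = ''
--     for i in str(ephem_time):
--         if i == ':':
--             break
--         else:
--             str_hour += i
--     return str_hour
--
-- def solar_to_chinese(solartime):  # returns a description of an hour
--     hour = int(find_hours(solartime))
--     for i in chinese_time:
--         if hour in i:
--             return f'Now it is {chinese_time[i][0]} ({chinese_time[i][3]}) hour (earthly branch). \n' \
--                    f'The direction of the earthly branch is {chinese_time[i][4]}. \n' \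
--                    f'Now it is active {chinese_time[i][2]} meridian.' \
--                    f'The animal of the hour is {chinese_time[i][1]}. ' \
--                    f'This chinese hour lasts {i[0]} and {i[1]} astronomic hours.'
--
-- chinese_time = {  # a description of an hour
--            (23, 0): ['子', 'rat', 'gallbladder', 'zi', '0° (north)', 'water'],
--            (1, 2): ['丑', 'ox', 'liver', 'chou', '30°', 'earth'],
--            (3, 4): ['寅', 'tiger', 'lung', 'yin', '60°', 'tree'],
--            (5, 6): ['卯', 'rabbit', 'large intestine', 'mao', '90° (east)', 'tree'],
--            (7, 8): ['辰', 'dragon', 'stomach', 'chen', '120°', 'earth'],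
--            (9, 10): ['巳', 'snake', 'spleen', 'si', '150°', 'fire'],
--            (11, 12): ['午', 'horse', 'heart', 'wu', '180° (south)', 'fire'],
--            (13, 14): ['未', 'goat', 'small intestine', 'wei', '210°', 'earth'],
--            (15, 16): ['申', 'monkey', 'urinary bladder', 'shen', '240°', 'metal'],
--            (17, 18): ['酉', 'rooster', 'kidney', 'you', '270° (west)', 'metal'],
--            (19, 20): ['戌', 'dog', 'pericardium', 'xu', '300°', 'earth'],
--            (21, 22): ['亥', 'pig', 'triple burner', 'hai', '330°', 'water'],
--            }
-- ===== SOURCE B (Python) =====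
-- # Different strategy: precompute once a 24-entry hour->description dict, then each call
-- # is just parse + one dict lookup (no scan over tuple keys at call time).
--
-- _ROWS = [
--     ('子', 'rat', 'gallbladder', 'zi', '0° (north)', 'water'),
--     ('丑', 'ox', 'liver', 'chou', '30°', 'earth'),
--     ('寅', 'tiger', 'lung', 'yin', '60°', 'tree'),
--     ('卯', 'rabbit', 'large intestine', 'mao', '90° (east)', 'tree'),
--     ('辰', 'dragon', 'stomach', 'chen', '120°', 'earth'),
--     ('巳', 'snake', 'spleen', 'si', '150°', 'fire'),
--     ('午', 'horse', 'heart', 'wu', '180° (south)', 'fire'),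
--     ('未', 'goat', 'small intestine', 'wei', '210°', 'earth'),
--     ('申', 'monkey', 'urinary bladder', 'shen', '240°', 'metal'),
--     ('酉', 'rooster', 'kidney', 'you', '270° (west)', 'metal'),
--     ('戌', 'dog', 'pericardium', 'xu', '300°', 'earth'),
--     ('亥', 'pig', 'triple burner', 'hai', '330°', 'water'),
-- ]
--
--
-- def _build_by_hour():
--     table = {}
--     for idx, (sym, animal, meridian, name, direction, _element) in enumerate(_ROWS):
--         h1 = (2 * idx - 1) % 24
--         h2 = (2 * idx) % 24
--         msg = f'Now it is {sym} ({name}) hour (earthly branch). \n' \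
--               f'The direction of the earthly branch is {direction}. \n' \
--               f'Now it is active {meridian} meridian.' \
--               f'The animal of the hour is {animal}. ' \
--               f'This chinese hour lasts {h1} and {h2} astronomic hours.'
--         table[h1] = msg
--         table[h2] = msg
--     return table
--
--
-- _BY_HOUR = _build_by_hour()
--
--
-- def solar_to_chinese(solartime):  # returns a description of an hour
--     return _BY_HOUR.get(int(str(solartime).split(':')[0]))
-- ===== Notes on version B (the rewrite author's own statement) =====
-- stated objective: alternative
-- what changed: B precomputes once a 24-entry hour-to-description dict (deriving each branch's two hours as (2*idx-1)%24 and 2*idx%24), so each call is just int(split(':')[0]) plus one dict lookup, instead of A's per-call char loop and linear scan over the 12 tuple keys; out-of-range hours fall out naturally as a missing key (None), matching A's fall-through.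
import Mathlib
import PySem

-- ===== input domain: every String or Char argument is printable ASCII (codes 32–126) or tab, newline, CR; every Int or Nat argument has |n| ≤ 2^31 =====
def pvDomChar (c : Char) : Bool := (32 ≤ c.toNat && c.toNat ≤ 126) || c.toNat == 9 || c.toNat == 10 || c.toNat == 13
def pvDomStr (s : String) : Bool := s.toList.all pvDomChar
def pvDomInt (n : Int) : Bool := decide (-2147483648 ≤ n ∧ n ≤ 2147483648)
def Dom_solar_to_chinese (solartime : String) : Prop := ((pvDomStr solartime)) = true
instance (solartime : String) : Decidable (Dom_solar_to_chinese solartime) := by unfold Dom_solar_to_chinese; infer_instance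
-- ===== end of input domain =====

-- B precomputes a 24-entry hour→description dict once and answers each call with one lookup,
-- instead of A's per-call char loop and linear scan over the 12 tuple keys; objective: alternative.

-- ===== PORT A =====
-- A's dict literal, in insertion order
def aChineseTime : PySem.Dict (Int × Int) (List String) :=
  ⟨[((23, 0), ["子", "rat", "gallbladder", "zi", "0° (north)", "water"]),
    ((1, 2), ["丑", "ox", "liver", "chou", "30°", "earth"]),
    ((3, 4), ["寅", "tiger", "lung", "yin", "60°", "tree"]),
    ((5, 6), ["卯", "rabbit", "large intestine", "mao", "90° (east)", "tree"]),
    ((7, 8), ["辰", "dragon", "stomach", "chen", "120°", "earth"]),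
    ((9, 10), ["巳", "snake", "spleen", "si", "150°", "fire"]),
    ((11, 12), ["午", "horse", "heart", "wu", "180° (south)", "fire"]),
    ((13, 14), ["未", "goat", "small intestine", "wei", "210°", "earth"]),
    ((15, 16), ["申", "monkey", "urinary bladder", "shen", "240°", "metal"]),
    ((17, 18), ["酉", "rooster", "kidney", "you", "270° (west)", "metal"]),
    ((19, 20), ["戌", "dog", "pericardium", "xu", "300°", "earth"]),
    ((21, 22), ["亥", "pig", "triple burner", "hai", "330°", "water"])]⟩

-- the char-accumulating loop of find_hours (break at ':')
def findHoursLoop (acc : List Char) (cs : List Char) : List Char :=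
  match cs with
  | [] => acc
  | c :: rest => if c = ':' then acc else findHoursLoop (acc ++ [c]) rest

def find_hours (ephem_time : String) : String :=
  String.ofList (findHoursLoop [] ephem_time.toList)

-- the f-string A builds (chinese_time[i] is a dict lookup; i is a key, so getD's default is never used)
def aFormat (i : Int × Int) : String :=
  let v := PySem.Dict.getD aChineseTime i []
  "Now it is " ++ PySem.List.pyGetD v 0 "" ++ " (" ++ PySem.List.pyGetD v 3 "" ++ ") hour (earthly branch). \n" ++
  "The direction of the earthly branch is " ++ PySem.List.pyGetD v 4 "" ++ ". \n" ++
  "Now it is active " ++ PySem.List.pyGetD v 2 "" ++ " meridian." ++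
  "The animal of the hour is " ++ PySem.List.pyGetD v 1 "" ++ ". " ++
  "This chinese hour lasts " ++ PySem.Int.toStr i.1 ++ " and " ++ PySem.Int.toStr i.2 ++ " astronomic hours."

-- 'for i in chinese_time: if hour in i: return f"…"' — i ranges over the dict's keys
def scanLoop (hour : Int) (keys : List (Int × Int)) : Option String :=
  match keys with
  | [] => none
  | i :: rest => if hour = i.1 ∨ hour = i.2 then some (aFormat i) else scanLoop hour rest

def solar_to_chinese (solartime : String) : Option String :=
  match PySem.Int.ofChars? (find_hours solartime).toList with
  | none => none   -- int() raises ValueError here: excluded by Pre_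
  | some hour => scanLoop hour aChineseTime.keys

-- ===== PORT B =====
-- B's flat rows: (symbol, animal, meridian, name, direction, element), index = branch number
def bRows : List (String × String × String × String × String × String) :=
  [("子", "rat", "gallbladder", "zi", "0° (north)", "water"),
   ("丑", "ox", "liver", "chou", "30°", "earth"),
   ("寅", "tiger", "lung", "yin", "60°", "tree"),
   ("卯", "rabbit", "large intestine", "mao", "90° (east)", "tree"),
   ("辰", "dragon", "stomach", "chen", "120°", "earth"),
   ("巳", "snake", "spleen", "si", "150°", "fire"),
   ("午", "horse", "heart", "wu", "180° (south)", "fire"),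
   ("未", "goat", "small intestine", "wei", "210°", "earth"),
   ("申", "monkey", "urinary bladder", "shen", "240°", "metal"),
   ("酉", "rooster", "kidney", "you", "270° (west)", "metal"),
   ("戌", "dog", "pericardium", "xu", "300°", "earth"),
   ("亥", "pig", "triple burner", "hai", "330°", "water")]

def bMsg (r : String × String × String × String × String × String) (h1 h2 : Int) : String :=
  "Now it is " ++ r.1 ++ " (" ++ r.2.2.2.1 ++ ") hour (earthly branch). \n" ++
  "The direction of the earthly branch is " ++ r.2.2.2.2.1 ++ ". \n" ++
  "Now it is active " ++ r.2.2.1 ++ " meridian." ++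
  "The animal of the hour is " ++ r.2.1 ++ ". " ++
  "This chinese hour lasts " ++ PySem.Int.toStr h1 ++ " and " ++ PySem.Int.toStr h2 ++ " astronomic hours."

-- _build_by_hour(): the one-time hour→message table
def bByHour : PySem.Dict Int String :=
  (PySem.List.enumerate bRows).foldl
    (fun d p =>
      let h1 := PySem.Int.mod (2 * p.1 - 1) 24
      let h2 := PySem.Int.mod (2 * p.1) 24
      let msg := bMsg p.2 h1 h2
      (d.insert h1 msg).insert h2 msg)
    PySem.Dict.empty

def solar_to_chinese_alt (solartime : String) : Option String :=
  -- split(':') with a nonempty sep never raises, hence the .getD []; [0] always exists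
  match PySem.Int.ofChars? (PySem.List.pyGetD ((PySem.Str.split? solartime ":").getD []) 0 "").toList with
  | none => none   -- int() raises ValueError here: excluded by Pre_
  | some hour => PySem.Dict.get? bByHour hour

-- ===== PRECONDITION & SPEC =====
-- Pre_ excludes exactly the inputs where int() raises ValueError (the text before the first ':' is not an int literal)
def Pre_solar_to_chinese (solartime : String) : Prop :=
  (PySem.Int.ofChars? (solartime.toList.takeWhile (fun c => c != ':'))).isSome = true
instance (solartime : String) : Decidable (Pre_solar_to_chinese solartime) := by
  unfold Pre_solar_to_chinese; infer_instance
def pvWitness_solar_to_chinese : String := "7:30"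

def Spec_solar_to_chinese (solartime : String) (out : Option String) : Prop := out = solar_to_chinese_alt solartime
instance (solartime : String) (out : Option String) : Decidable (Spec_solar_to_chinese solartime out) := by unfold Spec_solar_to_chinese; infer_instance

-- ===== CLAIM =====
def Claim_equal_solar_to_chinese : Prop := ∀ (solartime : String), Dom_solar_to_chinese solartime → Pre_solar_to_chinese solartime → Spec_solar_to_chinese solartime (solar_to_chinese solartime)

-- ===== LEMMAS AND PROOFS =====

-- A's accumulating loop computes takeWhile (· ≠ ':')
lemma findHoursLoop_eq (cs : List Char) : ∀ acc, findHoursLoop acc cs = acc ++ cs.takeWhile (fun c => c != ':') := by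
  induction cs with
  | nil => intro acc; simp [findHoursLoop]
  | cons c rest ih =>
    intro acc
    by_cases h : c = ':'
    · simp [findHoursLoop, h, List.takeWhile]
    · have hb : (c != ':') = true := by simp [h]
      simp [findHoursLoop, h, List.takeWhile, ih, List.append_assoc, hb]

-- the first piece of splitOn … [':'] is takeWhile (· ≠ ':')
lemma splitOn_go_head (fuel : Nat) : ∀ (l cur : List Char) (acc : List (List Char)), l.length ≤ fuel →
    ∃ tail, PySem.Chars.splitOn.go [':'] fuel l cur acc =
      acc.reverse ++ (cur.reverse ++ l.takeWhile (fun c => c != ':')) :: tail := by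
  induction fuel with
  | zero =>
    intro l cur acc hl
    have : l = [] := List.eq_nil_of_length_eq_zero (Nat.le_zero.mp hl)
    subst this
    exact ⟨[], by simp [PySem.Chars.splitOn.go]⟩
  | succ n ih =>
    intro l cur acc hl
    match l with
    | [] => exact ⟨[], by simp [PySem.Chars.splitOn.go]⟩
    | c :: rest =>
      by_cases h : c = ':'
      · subst h
        have hpre : List.isPrefixOf [':'] (':' :: rest) = true := by simp [List.isPrefixOf]
        obtain ⟨tail, htail⟩ := ih rest [] (cur.reverse :: acc) (by simpa using Nat.le_of_succ_le_succ hl)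
        refine ⟨(rest.takeWhile (fun c => c != ':')) :: tail, ?_⟩
        simp [PySem.Chars.splitOn.go, hpre, htail, List.takeWhile]
      · have hpre : List.isPrefixOf [':'] (c :: rest) = false := by
          simp [List.isPrefixOf]; exact fun hc => absurd hc.symm h
        obtain ⟨tail, htail⟩ := ih rest (c :: cur) acc (by simpa using Nat.le_of_succ_le_succ hl)
        refine ⟨tail, ?_⟩
        have hb : (c != ':') = true := by simp [h]
        simp [PySem.Chars.splitOn.go, hpre, htail, List.takeWhile, hb]

lemma splitOn_head (s : List Char) :
    ∃ tail, PySem.Chars.splitOn s [':'] = (s.takeWhile (fun c => c != ':')) :: tail := by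
  obtain ⟨tail, h⟩ := splitOn_go_head (s.length + 1) s [] [] (by omega)
  exact ⟨tail, by simpa [PySem.Chars.splitOn] using h⟩

-- both ports parse the same hour: the chars before the first ':'
lemma parseA_eq (s : String) :
    (find_hours s).toList = s.toList.takeWhile (fun c => c != ':') := by
  simp [find_hours, findHoursLoop_eq]

lemma parseB_eq (s : String) :
    (PySem.List.pyGetD ((PySem.Str.split? s ":").getD []) 0 "").toList
      = s.toList.takeWhile (fun c => c != ':') := by
  obtain ⟨tail, h⟩ := splitOn_head s.toList
  simp [PySem.Str.split?, PySem.Chars.split?, h, PySem.List.pyGetD, PySem.List.pyIdx?, PySem.List.pyGet?]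

-- a scan over keys none of which matches hour returns none
lemma scanLoop_none (hour : Int) : ∀ keys : List (Int × Int),
    (∀ i ∈ keys, hour ≠ i.1 ∧ hour ≠ i.2) → scanLoop hour keys = none := by
  intro keys
  induction keys with
  | nil => intro _; rfl
  | cons i rest ih =>
    intro hk
    have h1 := hk i (by simp)
    rw [scanLoop, if_neg (by tauto)]
    exact ih (fun j hj => hk j (by simp [hj]))

-- B's built table has exactly the hours 0..23 as keys
lemma bByHour_keys : bByHour.keys = [23, 0, 1, 2, 3, 4, 5, 6, 7, 8, 9, 10, 11, 12, 13, 14, 15, 16, 17, 18, 19, 20, 21, 22] := by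
  decide

-- the key equivalence: A's scan over the 12 tuple keys equals a lookup in B's precomputed table
lemma scan_eq_lookup (hour : Int) :
    scanLoop hour aChineseTime.keys = PySem.Dict.get? bByHour hour := by
  by_cases h : 0 ≤ hour ∧ hour ≤ 23
  · obtain ⟨h0, h23⟩ := h
    interval_cases hour <;> rfl
  · rw [scanLoop_none, Eq.comm, PySem.Dict.get?_eq_none_iff_not_mem_keys, bByHour_keys]
    · simp only [List.mem_cons, List.not_mem_nil, or_false]
      omega
    · intro i hi
      simp only [aChineseTime, PySem.Dict.keys_mk] at hi
      simp only [List.map_cons, List.map_nil, List.mem_cons, List.not_mem_nil, or_false] at hi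
      rcases hi with h'|h'|h'|h'|h'|h'|h'|h'|h'|h'|h'|h' <;> subst h' <;> exact ⟨by omega, by omega⟩

-- ===== VERDICT =====
theorem solar_to_chinese_spec : Claim_equal_solar_to_chinese := by
  intro s _ hpre
  unfold Spec_solar_to_chinese solar_to_chinese solar_to_chinese_alt
  rw [parseA_eq, parseB_eq]
  unfold Pre_solar_to_chinese at hpre
  obtain ⟨hour, hh⟩ := Option.isSome_iff_exists.mp hpre
  rw [hh]
  exact scan_eq_lookup hour
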